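-- pv_equiv track=rewrite | github.com/miliar/Code_Jam_Webscraper | solutions_python/Problem_156/994.py | infinite_house_pancakes
-- ===== SOURCE A (Python) =====
-- def partition(pancake):
--     for i in range(2, pancake//2 + 1):
--         yield pancake - i, i
--
-- def infinite_house_pancakes(pancakes):
--     max_pancakes = max(pancakes)
--     count_max_pancakes = pancakes.count(max_pancakes)
--     if count_max_pancakes >= max_pancakes:
--         return max_pancakes
--     result = max_pancakes
--     pancakes = [x for x in pancakes if x != max_pancakes]
--     for a, b in partition(max_pancakes):
--         new_pancakes = pancakes[:]
--         new_pancakes.extend([a, b] * count_max_pancakes)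
--         tmp = infinite_house_pancakes(new_pancakes)
--         if tmp < result:
--             result = tmp
--     result += count_max_pancakes
--     if result >= max_pancakes:
--         return max_pancakes
--     return result
-- ===== SOURCE B (Python) =====
-- def infinite_house_pancakes(pancakes):
--     # cap formula: for each eating cap c, minutes = c + splits needed; take the best cap
--     m = max(pancakes)
--     if m <= 1:
--         return m
--     return min(c + sum((p - 1) // c for p in pancakes if p > 0)
--                for c in range(1, m + 1))
-- ===== Notes on version B (the rewrite author's own statement) =====
-- stated objective: faster
-- what changed: A minimizes over an exponential tree of recursive splits of the maximum stack; B computes the same optimum in one pass over the possible per-diner caps c = 1..max, charging c + sum(ceil(p/c)-1) splits per stack (intended as asymptotically faster; measured: A already timed out at size 16 where B returned, so no ratio could be read).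
-- outside the precondition, e.g. on infinite_house_pancakes([]): A raises ValueError, B raises ValueError
import Mathlib
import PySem

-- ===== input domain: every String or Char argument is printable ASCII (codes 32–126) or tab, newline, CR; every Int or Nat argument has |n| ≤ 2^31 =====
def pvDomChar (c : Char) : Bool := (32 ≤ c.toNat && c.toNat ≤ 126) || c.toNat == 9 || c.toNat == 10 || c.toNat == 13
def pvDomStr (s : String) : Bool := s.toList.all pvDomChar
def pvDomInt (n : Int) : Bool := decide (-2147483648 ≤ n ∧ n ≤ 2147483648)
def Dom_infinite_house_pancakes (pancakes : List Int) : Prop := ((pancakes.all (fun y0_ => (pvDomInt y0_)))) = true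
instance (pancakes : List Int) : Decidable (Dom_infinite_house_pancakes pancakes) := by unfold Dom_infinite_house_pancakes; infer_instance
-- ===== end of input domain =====

-- B replaces A's exponential branching recursion over splits of the maximum by a single pass
-- over the possible "caps" c (eat the largest piece of size c): minutes = c + number of splits
-- ⌈p/c⌉-1 for each stack p; the minimum over c = 1..max equals A's recursion (proved below).

-- ===== PORT A =====
-- A recurses on lists whose maximum strictly decreases; the port carries a fuel argument
-- (max+1 is always sufficient — the proofs below only ever use fuel > max); the fuel only
-- makes the same computation total, it never changes a computed value.
def ihpGo : Nat → List Int → Int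
  | 0, _ => 0
  | fuel+1, ps =>
    let M := (PySem.List.max? ps (fun y => y)).getD 0        -- max(pancakes)
    let k : Int := (PySem.List.count ps M : Int)             -- pancakes.count(max_pancakes)
    if M ≤ k then M
    else
      let rest := ps.filter (fun x => x != M)                -- [x for x in pancakes if x != max]
      -- for a, b in partition(max): a = max - i, b = i, i in range(2, max//2 + 1)
      let result := (PySem.List.pyRange 2 (PySem.Int.floordiv M 2 + 1) 1).foldl
        (fun result i =>
          let tmp := ihpGo fuel (rest ++ PySem.List.pyRepeat [M - i, i] k)  -- extend([a,b]*count)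
          if tmp < result then tmp else result) M
      if M ≤ result + k then M else result + k

def infinite_house_pancakes (pancakes : List Int) : Int :=
  ihpGo (((PySem.List.max? pancakes (fun y => y)).getD 0).toNat + 1) pancakes

-- ===== PORT B =====
-- c + sum((p - 1) // c for p in pancakes if p > 0)
def pvCost (pancakes : List Int) (c : Int) : Int :=
  c + pancakes.foldl (fun s p => if 0 < p then s + PySem.Int.floordiv (p - 1) c else s) 0

def infinite_house_pancakes_alt (pancakes : List Int) : Int :=
  let m := (PySem.List.max? pancakes (fun y => y)).getD 0    -- max(pancakes)
  if m ≤ 1 then m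
  else
    -- min(c + sum(...) for c in range(1, m + 1))
    (PySem.List.min? ((PySem.List.pyRange 1 (m + 1) 1).map (pvCost pancakes)) (fun y => y)).getD 0

-- ===== PRECONDITION & SPEC =====
-- Pre_ excludes only the empty list, on which Python's max([]) raises ValueError.
def Pre_infinite_house_pancakes (pancakes : List Int) : Prop := pancakes ≠ []
instance (pancakes : List Int) : Decidable (Pre_infinite_house_pancakes pancakes) := by
  unfold Pre_infinite_house_pancakes; infer_instance

def pvWitness_infinite_house_pancakes : List Int := [3, 2]

def Spec_infinite_house_pancakes (pancakes : List Int) (out : Int) : Prop :=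
  out = infinite_house_pancakes_alt pancakes
instance (pancakes : List Int) (out : Int) : Decidable (Spec_infinite_house_pancakes pancakes out) := by
  unfold Spec_infinite_house_pancakes; infer_instance

-- ===== CLAIM (what is proved, stated in full; the proofs are below) =====
def Claim_equal_infinite_house_pancakes : Prop :=
  ∀ (pancakes : List Int), Dom_infinite_house_pancakes pancakes →
    Pre_infinite_house_pancakes pancakes →
    Spec_infinite_house_pancakes pancakes (infinite_house_pancakes pancakes)

-- ===== LEMMAS AND PROOFS =====

-- Floor-division facts (divisor positive).
theorem pvFd_nonneg {x c : Int} (hc : 0 < c) (hx : 0 ≤ x) : 0 ≤ PySem.Int.floordiv x c := by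
  exact (PySem.Int.le_floordiv_iff_mul_le hc).mpr (by linarith)

theorem pvFd_zero {x c : Int} (hc : 0 < c) (h0 : 0 ≤ x) (h1 : x < c) :
    PySem.Int.floordiv x c = 0 := by
  exact (PySem.Int.floordiv_eq_iff_of_pos hc).mpr ⟨by linarith, by linarith⟩

theorem pvFd_shift {x c : Int} (hc : 0 < c) :
    PySem.Int.floordiv (x + c) c = PySem.Int.floordiv x c + 1 := by
  have h1 : PySem.Int.floordiv x c * c ≤ x := (PySem.Int.le_floordiv_iff_mul_le hc).mp le_rfl
  have h2 : x < (PySem.Int.floordiv x c + 1) * c :=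
    (PySem.Int.floordiv_lt_iff_lt_mul hc).mp (lt_add_one _)
  exact (PySem.Int.floordiv_eq_iff_of_pos hc).mpr ⟨by nlinarith, by nlinarith⟩

theorem pvFd_ge_one {x c : Int} (hc : 0 < c) (h : c ≤ x) : 1 ≤ PySem.Int.floordiv x c := by
  exact (PySem.Int.le_floordiv_iff_mul_le hc).mpr (by linarith)

-- ⌊(x+y+1)/c⌋ ≤ ⌊x/c⌋ + ⌊y/c⌋ + 1
theorem pvFd_superadd {x y c : Int} (hc : 0 < c) (hx : 0 ≤ x) (hy : 0 ≤ y) :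
    PySem.Int.floordiv (x + y + 1) c ≤ PySem.Int.floordiv x c + PySem.Int.floordiv y c + 1 := by
  have h2x : x < (PySem.Int.floordiv x c + 1) * c :=
    (PySem.Int.floordiv_lt_iff_lt_mul hc).mp (lt_add_one _)
  have h2y : y < (PySem.Int.floordiv y c + 1) * c :=
    (PySem.Int.floordiv_lt_iff_lt_mul hc).mp (lt_add_one _)
  have : PySem.Int.floordiv (x + y + 1) c <
      PySem.Int.floordiv x c + PySem.Int.floordiv y c + 2 :=
    (PySem.Int.floordiv_lt_iff_lt_mul hc).mpr (by nlinarith)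
  omega

-- one summand of B's sum
def pvTerm (c p : Int) : Int := if 0 < p then PySem.Int.floordiv (p - 1) c else 0

theorem pvTerm_nonneg {c : Int} (hc : 0 < c) (p : Int) : 0 ≤ pvTerm c p := by
  unfold pvTerm
  split
  · exact pvFd_nonneg hc (by omega)
  · exact le_refl 0

theorem pvCost_eq (ps : List Int) (c : Int) :
    pvCost ps c = c + (ps.map (pvTerm c)).sum := by
  unfold pvCost
  have : (fun (s p : Int) => if 0 < p then s + PySem.Int.floordiv (p - 1) c else s)
      = fun s p => s + pvTerm c p := by
    funext s p
    unfold pvTerm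
    split <;> simp
  rw [this, PySem.List.foldl_add]
  ring

theorem pvSum_nonneg {c : Int} (hc : 0 < c) (ps : List Int) : 0 ≤ (ps.map (pvTerm c)).sum := by
  apply List.sum_nonneg
  intro x hx
  obtain ⟨p, _, rfl⟩ := List.mem_map.mp hx
  exact pvTerm_nonneg hc p

-- splitting a sum at the copies of M
theorem pvSum_split (ps : List Int) (M : Int) (f : Int → Int) :
    (ps.map f).sum
      = ((ps.filter (fun x => x != M)).map f).sum + (List.count M ps : Int) * f M := by
  induction ps with
  | nil => simp
  | cons x t ih =>
    by_cases hx : x = M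
    · subst hx
      simp only [List.filter_cons, bne_self_eq_false, List.map_cons, List.sum_cons,
        List.count_cons_self]
      push_cast
      rw [ih]
      ring
    · have hne : (x != M) = true := by simpa using hx
      have hxe : (x == M) = false := by simpa using hx
      simp only [List.filter_cons, hne, if_true, List.map_cons, List.sum_cons,
        List.count_cons, hxe]
      rw [ih]
      push_cast
      ring

-- [a,b]*n (n ≥ 0): membership and summed image
theorem pvRepPair_eq (a b n : Int) :
    PySem.List.pyRepeat [a, b] n = (List.replicate n.toNat [a, b]).flatten := by
  rfl

theorem pvMem_repPair {a b x : Int} {n : Nat} :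
    x ∈ (List.replicate n [a, b]).flatten ↔ 0 < n ∧ (x = a ∨ x = b) := by
  induction n with
  | zero => simp
  | succ m ih =>
    simp only [List.replicate_succ, List.flatten_cons, List.mem_append, ih]
    constructor
    · rintro (h | ⟨_, h⟩)
      · exact ⟨Nat.succ_pos m, by simpa using h⟩
      · exact ⟨Nat.succ_pos m, h⟩
    · rintro ⟨_, h⟩
      left
      simpa using h

theorem pvSum_repPair (a b : Int) (n : Nat) (f : Int → Int) :
    (((List.replicate n [a, b]).flatten).map f).sum = (n : Int) * (f a + f b) := by
  induction n with
  | zero => simp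
  | succ m ih =>
    simp only [List.replicate_succ, List.flatten_cons, List.map_append, List.sum_append, ih]
    push_cast
    simp
    ring

-- pvCost ps M = M when M bounds ps
theorem pvCost_max {ps : List Int} {M : Int} (h1 : 1 ≤ M) (hall : ∀ x ∈ ps, x ≤ M) :
    pvCost ps M = M := by
  have hM0 : 0 < M := by omega
  rw [pvCost_eq]
  have hz : ∀ x ∈ ps.map (pvTerm M), x = 0 := by
    intro x hx
    obtain ⟨p, hp, rfl⟩ := List.mem_map.mp hx
    unfold pvTerm
    split
    · exact pvFd_zero hM0 (by omega) (by have := hall p hp; omega)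
    · rfl
  rw [List.sum_eq_zero hz]
  ring

-- B's value is ≤ every cost, and is attained at some cap
theorem pvAlt_le {ps : List Int} {M c : Int}
    (hM : PySem.List.max? ps (fun y => y) = some M) (h2 : 2 ≤ M)
    (hc1 : 1 ≤ c) (hcM : c ≤ M) :
    infinite_house_pancakes_alt ps ≤ pvCost ps c := by
  unfold infinite_house_pancakes_alt
  rw [hM, Option.getD_some, if_neg (by omega)]
  have hmem : pvCost ps c ∈ (PySem.List.pyRange 1 (M + 1) 1).map (pvCost ps) :=
    List.mem_map.mpr ⟨c, PySem.List.mem_pyRange_one.mpr ⟨hc1, by omega⟩, rfl⟩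
  cases hmin : PySem.List.min? ((PySem.List.pyRange 1 (M + 1) 1).map (pvCost ps)) (fun y => y) with
  | none =>
    have := (PySem.List.min?_eq_none_iff _ _).mp hmin
    rw [this] at hmem
    simp at hmem
  | some v =>
    rw [Option.getD_some]
    exact PySem.List.min?_isMin hmin _ hmem

theorem pvAlt_attained {ps : List Int} {M : Int}
    (hM : PySem.List.max? ps (fun y => y) = some M) (h2 : 2 ≤ M) :
    ∃ c, 1 ≤ c ∧ c ≤ M ∧ infinite_house_pancakes_alt ps = pvCost ps c := by
  unfold infinite_house_pancakes_alt
  rw [hM, Option.getD_some, if_neg (by omega)]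
  cases hmin : PySem.List.min? ((PySem.List.pyRange 1 (M + 1) 1).map (pvCost ps)) (fun y => y) with
  | none =>
    exfalso
    have hnil := (PySem.List.min?_eq_none_iff _ _).mp hmin
    have hmem : pvCost ps 1 ∈ (PySem.List.pyRange 1 (M + 1) 1).map (pvCost ps) :=
      List.mem_map.mpr ⟨1, PySem.List.mem_pyRange_one.mpr ⟨le_refl _, by omega⟩, rfl⟩
    rw [hnil] at hmem
    simp at hmem
  | some v =>
    obtain ⟨c, hc, hv⟩ := List.mem_map.mp (PySem.List.min?_mem hmin)
    have hcr := PySem.List.mem_pyRange_one.mp hc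
    exact ⟨c, hcr.1, by omega, by rw [Option.getD_some, hv]⟩

-- first branch: count ≥ max ⇒ B also returns max
theorem pvAlt_eq_max_of_count {ps : List Int} {M : Int}
    (hM : PySem.List.max? ps (fun y => y) = some M)
    (hk : M ≤ (List.count M ps : Int)) :
    infinite_house_pancakes_alt ps = M := by
  by_cases h1 : M ≤ 1
  · unfold infinite_house_pancakes_alt
    rw [hM, Option.getD_some, if_pos h1]
  · have h2 : 2 ≤ M := by omega
    have hup : infinite_house_pancakes_alt ps ≤ M := by
      have := pvAlt_le hM h2 (show (1:Int) ≤ M by omega) le_rfl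
      rwa [pvCost_max (by omega) (PySem.List.max?_isMax hM)] at this
    obtain ⟨c, hc1, hcM, heq⟩ := pvAlt_attained hM h2
    have hc0 : (0:Int) < c := by omega
    have hlow : M ≤ pvCost ps c := by
      rw [pvCost_eq, pvSum_split ps M (pvTerm c)]
      have hS : 0 ≤ ((ps.filter (fun x => x != M)).map (pvTerm c)).sum := pvSum_nonneg hc0 _
      have htM : pvTerm c M = PySem.Int.floordiv (M - 1) c := by
        unfold pvTerm
        rw [if_pos (by omega)]
      rw [htM]
      by_cases hcM2 : M ≤ c
      · have hf0 := pvFd_nonneg hc0 (show (0:Int) ≤ M - 1 by omega)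
        have hk0 : (0:Int) ≤ (List.count M ps : Int) := by positivity
        nlinarith
      · have hfd : 1 ≤ PySem.Int.floordiv (M - 1) c := pvFd_ge_one hc0 (by omega)
        nlinarith [mul_le_mul_of_nonneg_left hfd (show (0:Int) ≤ (List.count M ps : Int) by positivity)]
    rw [← heq] at hlow
    exact le_antisymm hup hlow

-- elements of a child list are ≤ M - 1
theorem pvNew_elems_le {ps : List Int} {M i k : Int}
    (hall : ∀ x ∈ ps, x ≤ M) (h2 : 2 ≤ M) (hi : 2 ≤ i) (hiM : i ≤ PySem.Int.floordiv M 2) :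
    ∀ x ∈ ps.filter (fun x => x != M) ++ PySem.List.pyRepeat [M - i, i] k, x ≤ M - 1 := by
  intro x hx
  rcases List.mem_append.mp hx with h | h
  · have hmem := List.mem_filter.mp h
    have hle := hall x hmem.1
    have hne : x ≠ M := by simpa using hmem.2
    omega
  · rw [pvRepPair_eq] at h
    have hhalf : PySem.Int.floordiv M 2 ≤ M - 1 := by
      have : PySem.Int.floordiv M 2 < M :=
        (PySem.Int.floordiv_lt_iff_lt_mul (by norm_num)).mpr (by omega)
      omega
    rcases (pvMem_repPair.mp h).2 with rfl | rfl <;> omega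

-- lower bound: every child costs at least B's value minus k
theorem pvStep_ge {ps : List Int} {M i : Int}
    (hM : PySem.List.max? ps (fun y => y) = some M) (h2 : 2 ≤ M)
    (hi : 2 ≤ i) (hiM : i ≤ PySem.Int.floordiv M 2) :
    infinite_house_pancakes_alt ps ≤
      infinite_house_pancakes_alt
        (ps.filter (fun x => x != M) ++ PySem.List.pyRepeat [M - i, i] (List.count M ps : Int))
      + (List.count M ps : Int) := by
  have hall := PySem.List.max?_isMax hM
  have hMmem := PySem.List.max?_mem hM
  have hkpos : 0 < List.count M ps := List.count_pos_iff.mpr hMmem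
  have hk1 : (1:Int) ≤ (List.count M ps : Int) := by omega
  have h2i : i * 2 ≤ M := (PySem.Int.le_floordiv_iff_mul_le (by norm_num)).mp hiM
  have himem : i ∈ ps.filter (fun x => x != M)
      ++ PySem.List.pyRepeat [M - i, i] (List.count M ps : Int) := by
    rw [pvRepPair_eq]
    exact List.mem_append.mpr (Or.inr (pvMem_repPair.mpr ⟨by omega, Or.inr rfl⟩))
  obtain ⟨N, hN⟩ : ∃ N, PySem.List.max? (ps.filter (fun x => x != M)
      ++ PySem.List.pyRepeat [M - i, i] (List.count M ps : Int)) (fun y => y) = some N := by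
    cases h : PySem.List.max? (ps.filter (fun x => x != M)
        ++ PySem.List.pyRepeat [M - i, i] (List.count M ps : Int)) (fun y => y) with
    | none =>
      rw [(PySem.List.max?_eq_none_iff _ _).mp h] at himem
      simp at himem
    | some v => exact ⟨v, rfl⟩
  have hNi : i ≤ N := PySem.List.max?_isMax hN i himem
  have hN2 : 2 ≤ N := le_trans hi hNi
  have hNM : N ≤ M - 1 := pvNew_elems_le hall h2 hi hiM N (PySem.List.max?_mem hN)
  obtain ⟨c, hc1, hcN, heq⟩ := pvAlt_attained hN hN2
  have hc0 : (0:Int) < c := by omega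
  have hle := pvAlt_le hM h2 hc1 (show c ≤ M by omega)
  rw [heq]
  refine le_trans hle ?_
  rw [pvCost_eq, pvCost_eq, List.map_append, List.sum_append, pvRepPair_eq, pvSum_repPair,
    pvSum_split ps M (pvTerm c)]
  have hkt : ((List.count M ps : Int).toNat : Int) = (List.count M ps : Int) :=
    Int.toNat_of_nonneg (by omega)
  rw [hkt]
  have htM : pvTerm c M = PySem.Int.floordiv (M - 1) c := by
    unfold pvTerm
    rw [if_pos (by omega)]
  have hta : pvTerm c (M - i) = PySem.Int.floordiv (M - i - 1) c := by
    unfold pvTerm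
    rw [if_pos (by omega)]
  have htb : pvTerm c i = PySem.Int.floordiv (i - 1) c := by
    unfold pvTerm
    rw [if_pos (by omega)]
  have hsup := pvFd_superadd (x := M - i - 1) (y := i - 1) hc0 (by omega) (by omega)
  rw [show M - i - 1 + (i - 1) + 1 = M - 1 by ring] at hsup
  rw [htM, hta, htb]
  nlinarith [mul_le_mul_of_nonneg_left hsup (show (0:Int) ≤ (List.count M ps : Int) by omega)]

-- at caps 1 and 2 the cost is never better at 1 (used to avoid cap 1 below)
theorem pvCost_two_le_one {ps : List Int} {M : Int}
    (hM : PySem.List.max? ps (fun y => y) = some M) (h2 : 2 ≤ M) :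
    pvCost ps 2 ≤ pvCost ps 1 := by
  have hMmem := PySem.List.max?_mem hM
  have hkpos : 0 < List.count M ps := List.count_pos_iff.mpr hMmem
  have hk1 : (1:Int) ≤ (List.count M ps : Int) := by omega
  have hfd1 : ∀ y : Int, PySem.Int.floordiv y 1 = y := fun y =>
    (PySem.Int.floordiv_eq_iff_of_pos one_pos).mpr ⟨by omega, by omega⟩
  rw [pvCost_eq, pvCost_eq, pvSum_split ps M (pvTerm 1), pvSum_split ps M (pvTerm 2)]
  have hsum : ((ps.filter (fun x => x != M)).map (pvTerm 2)).sum
      ≤ ((ps.filter (fun x => x != M)).map (pvTerm 1)).sum := by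
    apply List.sum_le_sum
    intro p _
    unfold pvTerm
    split
    · next hp =>
      rw [hfd1]
      have : PySem.Int.floordiv (p - 1) 2 < (p - 1) + 1 :=
        (PySem.Int.floordiv_lt_iff_lt_mul (by norm_num)).mpr (by omega)
      omega
    · exact le_rfl
  have htM1 : pvTerm 1 M = M - 1 := by
    unfold pvTerm
    rw [if_pos (by omega), hfd1]
  have htM2 : pvTerm 2 M ≤ M - 2 := by
    unfold pvTerm
    rw [if_pos (by omega)]
    have : PySem.Int.floordiv (M - 1) 2 < M - 1 :=
      (PySem.Int.floordiv_lt_iff_lt_mul (by norm_num)).mpr (by omega)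
    omega
  have h0 : 0 ≤ pvTerm 2 M := pvTerm_nonneg (by norm_num) M
  rw [htM1]
  nlinarith [mul_le_mul_of_nonneg_left htM2 (show (0:Int) ≤ (List.count M ps : Int) by omega)]

-- upper bound: if B's value beats M, some child attains it
theorem pvStep_le {ps : List Int} {M : Int}
    (hM : PySem.List.max? ps (fun y => y) = some M) (h2 : 2 ≤ M)
    (hlt : infinite_house_pancakes_alt ps < M) :
    ∃ i, 2 ≤ i ∧ i ≤ PySem.Int.floordiv M 2 ∧
      infinite_house_pancakes_alt
        (ps.filter (fun x => x != M) ++ PySem.List.pyRepeat [M - i, i] (List.count M ps : Int))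
      + (List.count M ps : Int) ≤ infinite_house_pancakes_alt ps := by
  have hall := PySem.List.max?_isMax hM
  have hMmem := PySem.List.max?_mem hM
  have hkpos : 0 < List.count M ps := List.count_pos_iff.mpr hMmem
  have hk1 : (1:Int) ≤ (List.count M ps : Int) := by omega
  obtain ⟨c₀, hc01, hc0M, heq0⟩ := pvAlt_attained hM h2
  obtain ⟨c, hc2, hcM, hcost⟩ :
      ∃ c, 2 ≤ c ∧ c ≤ M ∧ pvCost ps c ≤ infinite_house_pancakes_alt ps := by
    by_cases h1 : c₀ = 1
    · exact ⟨2, le_rfl, h2, by rw [heq0, h1]; exact pvCost_two_le_one hM h2⟩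
    · exact ⟨c₀, by omega, hc0M, le_of_eq heq0.symm⟩
  have hc0 : (0:Int) < c := by omega
  have hcM2 : c ≤ M - 2 := by
    by_contra hcon
    rcases (by omega : c = M - 1 ∨ c = M) with h | h
    · subst h
      have hfd : PySem.Int.floordiv (M - 1) (M - 1) = 1 :=
        (PySem.Int.floordiv_eq_iff_of_pos hc0).mpr ⟨by omega, by omega⟩
      have hlow : M ≤ pvCost ps (M - 1) := by
        rw [pvCost_eq, pvSum_split ps M (pvTerm (M - 1))]
        have hS := pvSum_nonneg hc0 (ps.filter (fun x => x != M))
        have htM : pvTerm (M - 1) M = PySem.Int.floordiv (M - 1) (M - 1) := by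
          unfold pvTerm
          rw [if_pos (by omega)]
        rw [htM, hfd]
        linarith
      linarith
    · have := pvCost_max (show (1:Int) ≤ M by omega) hall
      rw [h] at hcost
      linarith
  have hM4 : 4 ≤ M := by omega
  refine ⟨min c (M - c), by omega, ?_, ?_⟩
  · exact (PySem.Int.le_floordiv_iff_mul_le (by norm_num)).mpr (by omega)
  · have hcmem : c ∈ ps.filter (fun x => x != M)
        ++ PySem.List.pyRepeat [M - min c (M - c), min c (M - c)] (List.count M ps : Int) := by
      rw [pvRepPair_eq]
      refine List.mem_append.mpr (Or.inr (pvMem_repPair.mpr ⟨by omega, ?_⟩))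
      omega
    obtain ⟨N, hN⟩ : ∃ N, PySem.List.max? (ps.filter (fun x => x != M)
        ++ PySem.List.pyRepeat [M - min c (M - c), min c (M - c)]
          (List.count M ps : Int)) (fun y => y) = some N := by
      cases h : PySem.List.max? (ps.filter (fun x => x != M)
          ++ PySem.List.pyRepeat [M - min c (M - c), min c (M - c)]
            (List.count M ps : Int)) (fun y => y) with
      | none =>
        rw [(PySem.List.max?_eq_none_iff _ _).mp h] at hcmem
        simp at hcmem
      | some v => exact ⟨v, rfl⟩
    have hNc : c ≤ N := PySem.List.max?_isMax hN c hcmem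
    have halt_le := pvAlt_le hN (by omega) (show (1:Int) ≤ c by omega) hNc
    have hkt : ((List.count M ps : Int).toNat : Int) = (List.count M ps : Int) :=
      Int.toNat_of_nonneg (by omega)
    have hshift : PySem.Int.floordiv (M - 1) c = PySem.Int.floordiv (M - c - 1) c + 1 := by
      rw [show M - 1 = (M - c - 1) + c by ring, pvFd_shift hc0]
    have hpair : pvTerm c (M - min c (M - c)) + pvTerm c (min c (M - c))
        = PySem.Int.floordiv (M - c - 1) c := by
      have hcc : pvTerm c c = 0 := by
        unfold pvTerm
        rw [if_pos (by omega)]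
        exact pvFd_zero hc0 (by omega) (by omega)
      have hmc : pvTerm c (M - c) = PySem.Int.floordiv (M - c - 1) c := by
        unfold pvTerm
        rw [if_pos (by omega)]
      rcases (by omega : (min c (M - c) = c ∧ M - min c (M - c) = M - c)
          ∨ (min c (M - c) = M - c ∧ M - min c (M - c) = c)) with ⟨h1, h2'⟩ | ⟨h1, h2'⟩ <;>
        rw [h2', h1, hcc, hmc] <;> ring
    have hkey : pvCost (ps.filter (fun x => x != M)
        ++ PySem.List.pyRepeat [M - min c (M - c), min c (M - c)]
          (List.count M ps : Int)) c + (List.count M ps : Int) = pvCost ps c := by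
      rw [pvCost_eq, pvCost_eq, List.map_append, List.sum_append, pvRepPair_eq, pvSum_repPair,
        pvSum_split ps M (pvTerm c), hkt, hpair]
      have htM : pvTerm c M = PySem.Int.floordiv (M - 1) c := by
        unfold pvTerm
        rw [if_pos (by omega)]
      rw [htM, hshift]
      ring
    linarith

-- running-minimum fold
theorem pvFoldMin_le_init (l : List Int) (h : Int → Int) (a : Int) :
    l.foldl (fun r i => if h i < r then h i else r) a ≤ a := by
  induction l generalizing a with
  | nil => simp
  | cons x t ih =>
    simp only [List.foldl_cons]
    split
    · next hlt => exact le_trans (ih _) (le_of_lt hlt)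
    · exact ih _

theorem pvFoldMin_le_elem (l : List Int) (h : Int → Int) (a : Int) :
    ∀ i ∈ l, l.foldl (fun r i => if h i < r then h i else r) a ≤ h i := by
  induction l generalizing a with
  | nil => simp
  | cons x t ih =>
    intro i hi
    simp only [List.foldl_cons]
    rcases List.mem_cons.mp hi with rfl | hit
    · split
      · exact pvFoldMin_le_init t h _
      · next hnot => exact le_trans (pvFoldMin_le_init t h _) (by omega)
    · split <;> exact ih _ _ hit

theorem pvFoldMin_cases (l : List Int) (h : Int → Int) (a : Int) :
    l.foldl (fun r i => if h i < r then h i else r) a = a ∨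
      ∃ i ∈ l, l.foldl (fun r i => if h i < r then h i else r) a = h i := by
  induction l generalizing a with
  | nil => left; simp
  | cons x t ih =>
    simp only [List.foldl_cons]
    split
    · rcases ih (h x) with heq | ⟨i, hi, heq⟩
      · right
        exact ⟨x, List.mem_cons_self, heq⟩
      · right
        exact ⟨i, List.mem_cons_of_mem _ hi, heq⟩
    · rcases ih a with heq | ⟨i, hi, heq⟩
      · left
        exact heq
      · right
        exact ⟨i, List.mem_cons_of_mem _ hi, heq⟩

-- main induction on fuel
theorem pvMain (fuel : Nat) :
    ∀ ps M, PySem.List.max? ps (fun y => y) = some M → M.toNat < fuel →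
      ihpGo fuel ps = infinite_house_pancakes_alt ps := by
  induction fuel with
  | zero =>
    intro ps M hM hf
    omega
  | succ fuel ih =>
    intro ps M hM hf
    have hall := PySem.List.max?_isMax hM
    have hMmem := PySem.List.max?_mem hM
    have hkpos : 0 < List.count M ps := List.count_pos_iff.mpr hMmem
    simp only [ihpGo, PySem.List.count_eq, hM, Option.getD_some]
    by_cases hbr : M ≤ (List.count M ps : Int)
    · rw [if_pos hbr]
      exact (pvAlt_eq_max_of_count hM hbr).symm
    · rw [if_neg hbr]
      have hk1 : (1:Int) ≤ (List.count M ps : Int) := by omega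
      have h2 : 2 ≤ M := by omega
      have hcong : (PySem.List.pyRange 2 (PySem.Int.floordiv M 2 + 1) 1).foldl
          (fun result i =>
            let tmp := ihpGo fuel
              (ps.filter (fun x => x != M) ++ PySem.List.pyRepeat [M - i, i] (List.count M ps : Int))
            if tmp < result then tmp else result) M
          = (PySem.List.pyRange 2 (PySem.Int.floordiv M 2 + 1) 1).foldl
          (fun result i =>
            if infinite_house_pancakes_alt
                (ps.filter (fun x => x != M) ++ PySem.List.pyRepeat [M - i, i] (List.count M ps : Int))
              < result then
              infinite_house_pancakes_alt
                (ps.filter (fun x => x != M) ++ PySem.List.pyRepeat [M - i, i] (List.count M ps : Int))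
            else result) M := by
        apply PySem.List.foldl_congr_mem
        intro acc i hi
        have hir := PySem.List.mem_pyRange_one.mp hi
        have hi2 : 2 ≤ i := hir.1
        have hiM : i ≤ PySem.Int.floordiv M 2 := by omega
        have himem : i ∈ ps.filter (fun x => x != M)
            ++ PySem.List.pyRepeat [M - i, i] (List.count M ps : Int) := by
          rw [pvRepPair_eq]
          exact List.mem_append.mpr (Or.inr (pvMem_repPair.mpr ⟨by omega, Or.inr rfl⟩))
        obtain ⟨N, hN⟩ : ∃ N, PySem.List.max? (ps.filter (fun x => x != M)
            ++ PySem.List.pyRepeat [M - i, i] (List.count M ps : Int)) (fun y => y) = some N := by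
          cases h : PySem.List.max? (ps.filter (fun x => x != M)
              ++ PySem.List.pyRepeat [M - i, i] (List.count M ps : Int)) (fun y => y) with
          | none =>
            rw [(PySem.List.max?_eq_none_iff _ _).mp h] at himem
            simp at himem
          | some v => exact ⟨v, rfl⟩
        have hNM : N ≤ M - 1 := pvNew_elems_le hall h2 hi2 hiM N (PySem.List.max?_mem hN)
        have heval := ih _ N hN (by omega)
        simp only [heval]
      rw [hcong]
      have hrle : (PySem.List.pyRange 2 (PySem.Int.floordiv M 2 + 1) 1).foldl
          (fun result i =>
            if infinite_house_pancakes_alt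
                (ps.filter (fun x => x != M) ++ PySem.List.pyRepeat [M - i, i] (List.count M ps : Int))
              < result then
              infinite_house_pancakes_alt
                (ps.filter (fun x => x != M) ++ PySem.List.pyRepeat [M - i, i] (List.count M ps : Int))
            else result) M ≤ M :=
        pvFoldMin_le_init _ _ _
      have hrel := pvFoldMin_le_elem (PySem.List.pyRange 2 (PySem.Int.floordiv M 2 + 1) 1)
        (fun i => infinite_house_pancakes_alt
          (ps.filter (fun x => x != M) ++ PySem.List.pyRepeat [M - i, i] (List.count M ps : Int))) M
      have hrcases := pvFoldMin_cases (PySem.List.pyRange 2 (PySem.Int.floordiv M 2 + 1) 1)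
        (fun i => infinite_house_pancakes_alt
          (ps.filter (fun x => x != M) ++ PySem.List.pyRepeat [M - i, i] (List.count M ps : Int))) M
      have hub : infinite_house_pancakes_alt ps ≤ M := by
        have := pvAlt_le hM h2 (show (1:Int) ≤ M by omega) le_rfl
        rwa [pvCost_max (by omega) hall] at this
      have hge : infinite_house_pancakes_alt ps ≤
          (PySem.List.pyRange 2 (PySem.Int.floordiv M 2 + 1) 1).foldl
          (fun result i =>
            if infinite_house_pancakes_alt
                (ps.filter (fun x => x != M) ++ PySem.List.pyRepeat [M - i, i] (List.count M ps : Int))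
              < result then
              infinite_house_pancakes_alt
                (ps.filter (fun x => x != M) ++ PySem.List.pyRepeat [M - i, i] (List.count M ps : Int))
            else result) M + (List.count M ps : Int) := by
        rcases hrcases with hcase | ⟨i, hi, hcase⟩
        · rw [hcase]
          omega
        · rw [hcase]
          have hir := PySem.List.mem_pyRange_one.mp hi
          exact pvStep_ge hM h2 hir.1 (by omega)
      by_cases hcase : infinite_house_pancakes_alt ps < M
      · obtain ⟨i0, hi02, hi0M, hi0le⟩ := pvStep_le hM h2 hcase
        have hi0mem : i0 ∈ PySem.List.pyRange 2 (PySem.Int.floordiv M 2 + 1) 1 :=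
          PySem.List.mem_pyRange_one.mpr ⟨hi02, by omega⟩
        have hrle2 := hrel i0 hi0mem
        simp only [] at hrle2
        rw [if_neg (by omega)]
        omega
      · have halt : infinite_house_pancakes_alt ps = M := le_antisymm hub (by omega)
        rw [if_pos (by omega)]
        omega

-- ===== VERDICT (by name: the statement is the Claim_ definition above) =====
theorem infinite_house_pancakes_spec : Claim_equal_infinite_house_pancakes := by
  intro ps _ hpre
  unfold Spec_infinite_house_pancakes
  obtain ⟨M, hM⟩ : ∃ M, PySem.List.max? ps (fun y => y) = some M := by
    cases h : PySem.List.max? ps (fun y => y) with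
    | none => exact absurd ((PySem.List.max?_eq_none_iff ps _).mp h) hpre
    | some m => exact ⟨m, rfl⟩
  unfold infinite_house_pancakes
  rw [hM, Option.getD_some]
  exact pvMain _ ps M hM (by omega)
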